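-- pv_equiv track=rewrite | github.com/mjark066/atbs | chap5/dragonLoot.py | addToInventory
-- ===== SOURCE A (Python) =====
-- def addToInventory(inventory, addedItems):
--     total_items = 0
--     for k in dragonLoot:
--         if (inventory.get(k, 0) == 0):
--             inventory[k] = 1
--         else:
--             inventory[k] += 1
--     for v in inventory.values():
--         total_items += v
--     return inventory, total_items
--
-- dragonLoot = ['gold coin', 'dagger', 'gold coin', 'gold coin', 'ruby']
-- ===== SOURCE B (Python) =====
-- # B: build a count of dragonLoot once, then touch each unique loot key a single
-- # time with its multiplicity (idiomatic; mutates `inventory` in place like A).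
-- def addToInventory(inventory, addedItems):
--     counts = {}
--     for k in dragonLoot:
--         counts[k] = counts.get(k, 0) + 1
--     for k, c in counts.items():
--         inventory[k] = inventory.get(k, 0) + c
--     return inventory, sum(inventory.values())
--
-- dragonLoot = ['gold coin', 'dagger', 'gold coin', 'gold coin', 'ruby']
-- ===== Notes on version B (the rewrite author's own statement) =====
-- stated objective: idiomatic
-- what changed: B pre-counts the fixed dragonLoot into a dict of multiplicities and adds each unique item once with its count (no per-occurrence if/else branch), then totals with sum(inventory.values()).
import Mathlib
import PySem

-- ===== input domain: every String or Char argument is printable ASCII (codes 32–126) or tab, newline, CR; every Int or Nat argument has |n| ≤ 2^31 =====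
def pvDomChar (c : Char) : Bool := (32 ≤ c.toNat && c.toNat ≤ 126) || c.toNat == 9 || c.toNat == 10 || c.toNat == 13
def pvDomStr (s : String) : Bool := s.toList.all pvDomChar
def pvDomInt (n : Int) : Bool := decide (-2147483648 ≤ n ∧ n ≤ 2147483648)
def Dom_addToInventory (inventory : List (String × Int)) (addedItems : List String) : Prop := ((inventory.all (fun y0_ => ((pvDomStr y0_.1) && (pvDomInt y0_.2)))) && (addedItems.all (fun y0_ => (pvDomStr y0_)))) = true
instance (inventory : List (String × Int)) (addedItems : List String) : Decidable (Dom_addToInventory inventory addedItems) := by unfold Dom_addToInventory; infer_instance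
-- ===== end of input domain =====

-- B touches each unique loot key once with its multiplicity instead of once per
-- occurrence with an if/else; both Pythons mutate `inventory` in place the same way,
-- the theorem is about the returned (dict, total) pair.

-- ===== PORT A =====
def dragonLoot : List String := ["gold coin", "dagger", "gold coin", "gold coin", "ruby"]

def addToInventory (inventory : List (String × Int)) (addedItems : List String) : (List (String × Int)) × Int :=
  let d := dragonLoot.foldl
    (fun d k => if d.getD k 0 == 0 then d.insert k 1 else d.insert k (d.getD k 0 + 1))
    (PySem.Dict.mk inventory)
  let total := d.values.foldl (· + ·) 0
  (d.items, total)

-- ===== PORT B =====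
-- counts = {} ; for k in dragonLoot: counts[k] = counts.get(k, 0) + 1
def lootCounts : PySem.Dict String Int :=
  dragonLoot.foldl (fun c k => c.insert k (c.getD k 0 + 1)) PySem.Dict.empty

def addToInventory_alt (inventory : List (String × Int)) (addedItems : List String) : (List (String × Int)) × Int :=
  let d := lootCounts.items.foldl
    (fun inv p => inv.insert p.1 (inv.getD p.1 0 + p.2))
    (PySem.Dict.mk inventory)
  (d.items, d.values.foldl (· + ·) 0)

-- ===== PRECONDITION & SPEC =====
def Spec_addToInventory (inventory : List (String × Int)) (addedItems : List String) (out : (List (String × Int)) × Int) : Prop := out = addToInventory_alt inventory addedItems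
instance (inventory : List (String × Int)) (addedItems : List String) (out : (List (String × Int)) × Int) : Decidable (Spec_addToInventory inventory addedItems out) := by unfold Spec_addToInventory; infer_instance

-- ===== CLAIM (what is proved, stated in full; the proofs are below) =====
def Claim_equal_addToInventory : Prop := ∀ (inventory : List (String × Int)) (addedItems : List String), Dom_addToInventory inventory addedItems → Spec_addToInventory inventory addedItems (addToInventory inventory addedItems)

-- ===== LEMMAS AND PROOFS =====

-- A's if/else step is always "insert k (getD k 0 + 1)".
theorem step_eq (d : PySem.Dict String Int) (k : String) :
    (if d.getD k 0 == 0 then d.insert k 1 else d.insert k (d.getD k 0 + 1))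
      = d.insert k (d.getD k 0 + 1) := by
  by_cases h : d.getD k 0 = 0 <;> simp [h]

-- replacing the value at k commutes with an intervening insert at k' ≠ k,
-- and the final value at k wins.
theorem repl_repl_self (l : List (String × Int)) (k : String) (v v' : Int) :
    List.map (fun p => if (p.1 == k) = true then (k, v') else p)
      (List.map (fun p => if (p.1 == k) = true then (k, v) else p) l)
      = List.map (fun p => if (p.1 == k) = true then (k, v') else p) l := by
  rw [List.map_map]
  apply List.map_congr_left
  intro p _
  by_cases hp : p.1 = k <;> simp [hp]

theorem repl_comm (l : List (String × Int)) (k k' : String) (h : k ≠ k')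
    (v w : Int) :
    List.map (fun p => if (p.1 == k) = true then (k, v) else p)
      (List.map (fun p => if (p.1 == k') = true then (k', w) else p) l)
      = List.map (fun p => if (p.1 == k') = true then (k', w) else p)
          (List.map (fun p => if (p.1 == k) = true then (k, v) else p) l) := by
  rw [List.map_map, List.map_map]
  apply List.map_congr_left
  intro p _
  have hne : ¬ k' = k := fun e => h e.symm
  by_cases hp : p.1 = k <;> by_cases hp' : p.1 = k' <;> simp_all [beq_iff_eq]

theorem repl_not_mem (d : PySem.Dict String Int) (k : String)
    (hk : d.contains k = false) (v : Int) :
    List.map (fun p => if (p.1 == k) = true then (k, v) else p) d.items = d.items := by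
  conv_rhs => rw [← List.map_id d.items]
  apply List.map_congr_left
  intro p hp
  have : p.1 ≠ k := by
    intro e
    have : d.contains k = true := by
      rw [PySem.Dict.contains_iff_mem_keys]
      exact e ▸ PySem.Dict.mem_keys_of_mem_items d hp
    simp [this] at hk
  simp [this]

-- replacing the value at k commutes with an intervening insert at k' ≠ k,
-- and the final value at k wins.
theorem insert_swap (d : PySem.Dict String Int) (k k' : String) (h : k ≠ k')
    (v v' w : Int) :
    ((d.insert k v).insert k' w).insert k v' = (d.insert k v').insert k' w := by
  apply PySem.Dict.ext
  have hne : ¬ k' = k := fun e => h e.symm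
  have hk' : ((d.insert k v).insert k' w).contains k = true := by
    simp [PySem.Dict.contains_insert, PySem.Dict.contains_insert_self]
  have hck' : (d.insert k v).contains k' = d.contains k' := by
    simp [PySem.Dict.contains_insert, hne]
  have hck2 : (d.insert k v').contains k' = d.contains k' := by
    simp [PySem.Dict.contains_insert, hne]
  rw [PySem.Dict.items_insert_of_contains _ _ hk']
  rw [PySem.Dict.items_insert, hck']
  rw [PySem.Dict.items_insert]
  rw [PySem.Dict.items_insert, hck2]
  rw [PySem.Dict.items_insert]
  by_cases hk : d.contains k = true <;> by_cases hkk : d.contains k' = true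
  · simp only [hk, hkk, if_true]
    rw [repl_comm _ _ _ h, repl_repl_self]
  · simp only [hk, hkk, if_true, Bool.false_eq_true, if_false]
    rw [List.map_append, repl_repl_self, List.map_cons, List.map_nil]
    simp [hne]
  · simp only [hk, hkk, if_true, Bool.false_eq_true, if_false]
    rw [List.map_append, List.map_append, List.map_append,
      repl_comm _ _ _ h, repl_not_mem d k (by simpa using hk) v']
    simp [h]
  · simp only [hk, hkk, Bool.false_eq_true, if_false]
    rw [List.map_append, List.map_append, repl_not_mem d k (by simpa using hk) v']
    simp [hne]

theorem main_eq (inventory : List (String × Int)) (addedItems : List String) :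
    addToInventory inventory addedItems = addToInventory_alt inventory addedItems := by
  unfold addToInventory addToInventory_alt dragonLoot
  rw [show lootCounts.items = [("gold coin", (3:Int)), ("dagger", 1), ("ruby", 1)] from by decide]
  simp only [List.foldl_cons, List.foldl_nil, step_eq]
  have hdg : ("dagger" : String) ≠ "gold coin" := by decide
  have hrg : ("ruby" : String) ≠ "gold coin" := by decide
  have hrd : ("ruby" : String) ≠ "dagger" := by decide
  have hgd : ("gold coin" : String) ≠ "dagger" := by decide
  simp only [PySem.Dict.getD_insert_of_ne _ _ _ hdg, PySem.Dict.getD_insert_of_ne _ _ _ hrg,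
    PySem.Dict.getD_insert_of_ne _ _ _ hrd, PySem.Dict.getD_insert_of_ne _ _ _ hgd,
    PySem.Dict.getD_insert_self, PySem.Dict.insert_insert_self]
  rw [insert_swap _ _ _ hgd]
  have hx : ∀ a : Int, a + 1 + 1 + 1 = a + 3 := fun a => by ring
  simp only [hx]

-- ===== VERDICT (by name: the statement is the Claim_ definition above) =====
theorem addToInventory_spec : Claim_equal_addToInventory := by
  intro inventory addedItems _
  unfold Spec_addToInventory
  exact main_eq inventory addedItems
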